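-- pv_equiv track=rewrite | github.com/mohammadfaiizan/ProjectI | DSA/Array/006_array_prefix_suffix.py | build_2d_prefix_sum
-- ===== SOURCE A (Python) =====
-- from typing import List
--
-- def build_2d_prefix_sum(matrix: List[List[int]]) -> List[List[int]]:
--     """Build 2D prefix sum matrix
--     Time: O(m*n), Space: O(m*n)
--     """
--     if not matrix or not matrix[0]:
--         return []
--
--     m, n = len(matrix), len(matrix[0])
--     prefix = [[0] * (n + 1) for _ in range(m + 1)]
--
--     for i in range(1, m + 1):
--         for j in range(1, n + 1):
--             prefix[i][j] = (matrix[i-1][j-1] +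
--                            prefix[i-1][j] +
--                            prefix[i][j-1] -
--                            prefix[i-1][j-1])
--
--     return prefix
-- ===== SOURCE B (Python) =====
-- def build_2d_prefix_sum(matrix):
--     """Build 2D prefix sum matrix via running row sums added to the previous
--     prefix row (single pass, no inclusion-exclusion, no preallocated grid)."""
--     if not matrix or not matrix[0]:
--         return []
--
--     n = len(matrix[0])
--     prev = [0] * (n + 1)
--     out = [prev]
--     for row in matrix:
--         cur = [0]
--         s = 0
--         for j in range(n):
--             s += row[j]
--             cur.append(s + prev[j + 1])
--         out.append(cur)
--         prev = cur
--     return out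
-- ===== Notes on version B (the rewrite author's own statement) =====
-- stated objective: alternative
-- what changed: Replaces the preallocated (m+1)x(n+1) grid filled by four-term inclusion-exclusion over index loops with a single row-by-row pass that keeps a running row sum and adds it to the previous prefix row.
import Mathlib
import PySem

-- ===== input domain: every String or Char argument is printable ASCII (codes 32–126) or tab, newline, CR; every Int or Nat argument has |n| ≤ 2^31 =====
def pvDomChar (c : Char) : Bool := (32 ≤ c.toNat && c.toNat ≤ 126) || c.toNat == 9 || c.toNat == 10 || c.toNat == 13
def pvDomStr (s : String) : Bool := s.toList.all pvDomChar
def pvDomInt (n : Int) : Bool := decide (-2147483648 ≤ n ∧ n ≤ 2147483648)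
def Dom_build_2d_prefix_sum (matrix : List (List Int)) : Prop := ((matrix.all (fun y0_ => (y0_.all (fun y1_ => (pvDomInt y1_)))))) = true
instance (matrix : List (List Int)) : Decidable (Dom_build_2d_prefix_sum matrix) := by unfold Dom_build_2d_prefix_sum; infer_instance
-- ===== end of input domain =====

-- B replaces A's inclusion-exclusion fill of a preallocated grid by a row-by-row pass with a
-- running row sum added to the previous prefix row (alternative decomposition, same O(m*n) cost).


-- ===== PORT A =====
-- literal port: guard, (m+1)×(n+1) zero grid ([[0]*(n+1) for _ in range(m+1)] = replicate),
-- then the two index loops filling prefix[i][j] by four-term inclusion-exclusion.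
-- All indices Python uses here are nonnegative and in range, so pyGetD/pySetD are exact.
def build_2d_prefix_sum (matrix : List (List Int)) : List (List Int) :=
  if matrix = [] ∨ matrix.headD [] = [] then []
  else
    let m : Int := matrix.length
    let n : Int := (matrix.headD []).length
    let pref0 : List (List Int) :=
      List.replicate (matrix.length + 1) (List.replicate ((matrix.headD []).length + 1) (0 : Int))
    (PySem.List.pyRange 1 (m + 1) 1).foldl (fun pref i =>
      (PySem.List.pyRange 1 (n + 1) 1).foldl (fun pref j =>
        let v : Int :=
          PySem.List.pyGetD (PySem.List.pyGetD matrix (i - 1) []) (j - 1) 0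
          + PySem.List.pyGetD (PySem.List.pyGetD pref (i - 1) []) j 0
          + PySem.List.pyGetD (PySem.List.pyGetD pref i []) (j - 1) 0
          - PySem.List.pyGetD (PySem.List.pyGetD pref (i - 1) []) (j - 1) 0
        PySem.List.pySetD pref i (PySem.List.pySetD (PySem.List.pyGetD pref i []) j v))
        pref) pref0

-- ===== PORT B =====
-- literal port of Source B: one pass over the rows, running sum s, cur built by appending.
def build_2d_prefix_sum_alt (matrix : List (List Int)) : List (List Int) :=
  if matrix = [] ∨ matrix.headD [] = [] then []
  else
    let n : Nat := (matrix.headD []).length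
    let prev0 : List Int := List.replicate (n + 1) (0 : Int)
    (matrix.foldl (fun (st : List (List Int) × List Int) row =>
        let cur := ((PySem.List.pyRange 0 (n : Int) 1).foldl
          (fun (cs : List Int × Int) j =>
            let s := cs.2 + PySem.List.pyGetD row j 0
            (cs.1 ++ [s + PySem.List.pyGetD st.2 (j + 1) 0], s))
          ([0], 0)).1
        (st.1 ++ [cur], cur))
      ([prev0], prev0)).1

-- ===== PRECONDITION & SPEC =====
-- Pre_ excludes exactly the ragged matrices in which some row is shorter than matrix[0]:
-- there Python A (and B) raises IndexError.
def Pre_build_2d_prefix_sum (matrix : List (List Int)) : Prop :=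
  ∀ row ∈ matrix, (matrix.headD []).length ≤ row.length
instance (matrix : List (List Int)) : Decidable (Pre_build_2d_prefix_sum matrix) := by
  unfold Pre_build_2d_prefix_sum; infer_instance
def pvWitness_build_2d_prefix_sum : List (List Int) := [[1, 2], [3, 4]]

def Spec_build_2d_prefix_sum (matrix : List (List Int)) (out : List (List Int)) : Prop := out = build_2d_prefix_sum_alt matrix
instance (matrix : List (List Int)) (out : List (List Int)) : Decidable (Spec_build_2d_prefix_sum matrix out) := by unfold Spec_build_2d_prefix_sum; infer_instance

-- ===== CLAIM (what is proved, stated in full; the proofs are below) =====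
def Claim_equal_build_2d_prefix_sum : Prop := ∀ (matrix : List (List Int)), Dom_build_2d_prefix_sum matrix → Pre_build_2d_prefix_sum matrix → Spec_build_2d_prefix_sum matrix (build_2d_prefix_sum matrix)

-- ===== LEMMAS AND PROOFS =====

def pvRowSum (row : List Int) (k : Nat) : Int := (row.take k).sum
def pvSpecRow (prev row : List Int) (n : Nat) : List Int :=
  0 :: (List.range n).map (fun j => pvRowSum row (j + 1) + prev.getD (j + 1) 0)

lemma pvRowSum_succ (row : List Int) (k : Nat) :
    pvRowSum row (k + 1) = pvRowSum row k + row.getD k 0 := by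
  induction row generalizing k with
  | nil => simp [pvRowSum]
  | cons a l ih =>
    cases k with
    | zero => simp [pvRowSum]
    | succ k => simp [pvRowSum, List.take_succ_cons] at *; rw [ih k]; ring

lemma pvSpecRow_succ (prev row : List Int) (n : Nat) :
    pvSpecRow prev row (n + 1)
      = pvSpecRow prev row n ++ [pvRowSum row (n + 1) + prev.getD (n + 1) 0] := by
  simp [pvSpecRow, List.range_succ]

lemma pvSpecRow_length (prev row : List Int) (n : Nat) :
    (pvSpecRow prev row n).length = n + 1 := by
  simp [pvSpecRow]

lemma pvSpecRow_getD (prev row : List Int) (n j : Nat) (h0 : prev.getD 0 0 = 0)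
    (hj : j ≤ n) : (pvSpecRow prev row n).getD j 0 = pvRowSum row j + prev.getD j 0 := by
  cases j with
  | zero =>
    simp only [List.getD] at h0
    simp [pvSpecRow, pvRowSum, List.getD, h0]
  | succ t =>
    have ht : t < n := by omega
    simp [pvSpecRow, List.getD, List.getElem?_map, List.getElem?_range ht]

def pvZ (n : Nat) : List Int := List.replicate (n + 1) (0 : Int)
def pvRows (prev : List Int) (n : Nat) : List (List Int) → List (List Int)
  | [] => []
  | r :: rs => pvSpecRow prev r n :: pvRows (pvSpecRow prev r n) n rs

lemma pvRows_length (prev : List Int) (n : Nat) (rs : List (List Int)) :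
    (pvRows prev n rs).length = rs.length := by
  induction rs generalizing prev with
  | nil => rfl
  | cons r rs ih => simp [pvRows, ih]

lemma pvRows_head_zero (prev : List Int) (n : Nat) (rs : List (List Int))
    (h0 : prev.getD 0 0 = 0) (i : Nat) :
    (((prev :: pvRows prev n rs).getD i []).getD 0 0) = 0 := by
  induction rs generalizing prev i with
  | nil => cases i with
    | zero => simpa using h0
    | succ t => simp [pvRows, List.getD]
  | cons r rs ih =>
    cases i with
    | zero => simpa using h0
    | succ t =>
      have := ih (pvSpecRow prev r n) (by simp [pvSpecRow, List.getD]) t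
      simpa [pvRows] using this

lemma pvRows_append_one (n : Nat) (rs : List (List Int)) (p : List Int) (r : List Int) :
    p :: pvRows p n (rs ++ [r])
      = (p :: pvRows p n rs) ++ [pvSpecRow ((p :: pvRows p n rs).getD rs.length []) r n] := by
  induction rs generalizing p with
  | nil => simp [pvRows, List.getD]
  | cons a rs ih =>
    have := ih (pvSpecRow p a n)
    simp only [pvRows, List.cons_append]
    congr 1

lemma bInner (n : Nat) (prev row : List Int) :
    ((PySem.List.pyRange 0 (n : Int) 1).foldl
      (fun (cs : List Int × Int) j =>
        (cs.1 ++ [(cs.2 + PySem.List.pyGetD row j 0) + PySem.List.pyGetD prev (j + 1) 0],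
         cs.2 + PySem.List.pyGetD row j 0))
      ([0], 0))
    = (pvSpecRow prev row n, pvRowSum row n) := by
  induction n with
  | zero => simp [pvSpecRow, pvRowSum, PySem.List.pyRange_one_eq_nil]
  | succ n ih =>
    have hcast : ((n + 1 : Nat) : Int) = (n : Int) + 1 := by push_cast; ring
    rw [hcast, PySem.List.pyRange_one_succ_right (by positivity), List.foldl_append, ih]
    simp only [List.foldl_cons, List.foldl_nil]
    have h1 : ((n : Int) + 1) = ((n + 1 : Nat) : Int) := hcast.symm
    rw [pvSpecRow_succ, pvRowSum_succ]
    rw [show ((n:Int)+1) = ((n+1:Nat):Int) from h1]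
    rw [PySem.List.pyGetD_natCast, PySem.List.pyGetD_natCast]

lemma bFold (n : Nat) (rs : List (List Int)) :
    ∀ (acc : List (List Int)) (prev : List Int),
    (rs.foldl (fun (st : List (List Int) × List Int) row =>
        (st.1 ++ [pvSpecRow st.2 row n], pvSpecRow st.2 row n)) (acc, prev))
    = (acc ++ pvRows prev n rs, (pvRows prev n rs).getLastD prev) := by
  induction rs with
  | nil => intro acc prev; simp [pvRows]
  | cons r rs ih =>
    intro acc prev
    simp only [List.foldl_cons]
    rw [ih]
    simp only [pvRows, List.append_assoc, List.singleton_append, Prod.mk.injEq]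
    refine ⟨trivial, ?_⟩
    show (pvRows (pvSpecRow prev r n) n rs).getLastD (pvSpecRow prev r n)
        = ((pvSpecRow prev r n :: pvRows (pvSpecRow prev r n) n rs).getLastD prev)
    rw [List.getLastD_cons]

def pvPartial (prev row : List Int) (n j : Nat) : List Int :=
  (pvSpecRow prev row n).take (j + 1) ++ List.replicate (n - j) 0

lemma pvPartial_zero (prev row : List Int) (n : Nat) :
    pvPartial prev row n 0 = pvZ n := by
  simp [pvPartial, pvSpecRow, pvZ, List.replicate_succ]

lemma pvPartial_last (prev row : List Int) (n : Nat) :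
    pvPartial prev row n n = pvSpecRow prev row n := by
  simp [pvPartial, List.take_of_length_le (le_of_eq (pvSpecRow_length prev row n))]

lemma pvPartial_getD (prev row : List Int) (n j : Nat) (hj : j ≤ n) :
    (pvPartial prev row n j).getD j 0 = (pvSpecRow prev row n).getD j 0 := by
  have h : j < ((pvSpecRow prev row n).take (j + 1)).length := by
    simp [List.length_take, pvSpecRow_length]; omega
  simp only [pvPartial, List.getD, List.getElem?_append_left h, List.getElem?_take]
  simp

lemma pvPartial_set (prev row : List Int) (n j : Nat) (hj : j < n) :
    (pvPartial prev row n j).set (j + 1) ((pvSpecRow prev row n).getD (j + 1) 0)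
      = pvPartial prev row n (j + 1) := by
  have hlen : ((pvSpecRow prev row n).take (j + 1)).length = j + 1 := by
    simp [List.length_take, pvSpecRow_length]; omega
  have hlt : j + 1 < (pvSpecRow prev row n).length := by simp [pvSpecRow_length]; omega
  have hrep : List.replicate (n - j) (0 : Int) = 0 :: List.replicate (n - j - 1) 0 := by
    rw [← List.replicate_succ]; congr 1; omega
  rw [pvPartial, List.set_append_right _ _ (by omega), hrep]
  simp only [hlen, Nat.sub_self, List.set_cons_zero]
  have hget : (pvSpecRow prev row n).getD (j + 1) 0 = (pvSpecRow prev row n)[j + 1] := by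
    simp [List.getD, List.getElem?_eq_getElem hlt]
  rw [hget]
  have h3 : (List.take (j + 1) (pvSpecRow prev row n)).concat (pvSpecRow prev row n)[j + 1]
      = List.take (j + 2) (pvSpecRow prev row n) := List.take_concat_get hlt
  simp only [List.concat_eq_append] at h3
  rw [show List.take (j + 1) (pvSpecRow prev row n) ++ (pvSpecRow prev row n)[j + 1] :: List.replicate (n - j - 1) 0
      = (List.take (j + 1) (pvSpecRow prev row n) ++ ((pvSpecRow prev row n)[j + 1] :: List.replicate (n - j - 1) 0)) from rfl]
  rw [show ((pvSpecRow prev row n)[j + 1] :: List.replicate (n - j - 1) 0)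
      = [(pvSpecRow prev row n)[j + 1]] ++ List.replicate (n - j - 1) 0 from rfl]
  rw [← List.append_assoc]
  rw [show List.take (j + 1) (pvSpecRow prev row n) ++ [(pvSpecRow prev row n)[j + 1]]
      = List.take (j + 2) (pvSpecRow prev row n) from by
        simp [List.concat_eq_append, h3]]
  rw [show n - j - 1 = n - (j + 1) from by omega]
  rfl

lemma aInnerAux (matrix : List (List Int)) (n k : Nat) (pref : List (List Int)) (prev : List Int)
    (h1 : pref.getD k [] = prev) (h2 : pref.getD (k + 1) [] = pvZ n)
    (h0 : prev.getD 0 0 = 0) (hk : k + 1 < pref.length) :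
    ∀ j, j ≤ n →
    ((PySem.List.pyRange 1 ((j : Int) + 1) 1).foldl (fun pref jj =>
        PySem.List.pySetD pref ((k : Int) + 1)
          (PySem.List.pySetD (PySem.List.pyGetD pref ((k : Int) + 1) []) jj
            (PySem.List.pyGetD (PySem.List.pyGetD matrix ((k : Int) + 1 - 1) []) (jj - 1) 0
             + PySem.List.pyGetD (PySem.List.pyGetD pref ((k : Int) + 1 - 1) []) jj 0
             + PySem.List.pyGetD (PySem.List.pyGetD pref ((k : Int) + 1) []) (jj - 1) 0
             - PySem.List.pyGetD (PySem.List.pyGetD pref ((k : Int) + 1 - 1) []) (jj - 1) 0)))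
      pref)
    = pref.set (k + 1) (pvPartial prev (matrix.getD k []) n j) := by
  intro j
  induction j with
  | zero =>
    intro _
    rw [PySem.List.pyRange_one_eq_nil (by omega)]
    rw [pvPartial_zero, ← h2]
    have hsome : pref[k+1]? = some (pref.getD (k+1) []) :=
      by rw [List.getElem?_eq_getElem hk]; simp [List.getD, List.getElem?_eq_getElem hk]
    simp only [List.foldl_nil, List.getD] at *
    rw [show pref[k+1]?.getD [] = pref[k+1] from by simp [List.getElem?_eq_getElem hk]]
    exact (List.set_getElem_self hk).symm
  | succ j ih =>
    intro hj
    have ihh := ih (by omega)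
    have hc : ((j + 1 : Nat) : Int) + 1 = ((j : Int) + 1) + 1 := by push_cast; ring
    rw [hc, PySem.List.pyRange_one_succ_right (by omega), List.foldl_append, ihh]
    simp only [List.foldl_cons, List.foldl_nil]
    -- normalize the Int index arithmetic and casts
    have e1 : (k : Int) + 1 - 1 = ((k : Nat) : Int) := by ring
    have e2 : (k : Int) + 1 = ((k + 1 : Nat) : Int) := by push_cast; ring
    have e3 : ((j : Int) + 1) - 1 = ((j : Nat) : Int) := by ring
    have e4 : (j : Int) + 1 = ((j + 1 : Nat) : Int) := by push_cast; ring
    rw [e1, e3]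
    simp only [e2, e4, PySem.List.pySetD_natCast, PySem.List.pyGetD_natCast]
    have gA : (pref.set (k + 1) (pvPartial prev (matrix.getD k []) n j)).getD (k + 1) []
        = pvPartial prev (matrix.getD k []) n j := by
      simp [List.getD, List.getElem?_set_self (by simpa using hk)]
    have gB : (pref.set (k + 1) (pvPartial prev (matrix.getD k []) n j)).getD k [] = prev := by
      rw [← h1]; simp [List.getD, List.getElem?_set_ne (by omega : k + 1 ≠ k)]
    rw [gA, gB, List.set_set]
    have hval : (matrix.getD k []).getD j 0 + prev.getD (j + 1) 0
        + (pvPartial prev (matrix.getD k []) n j).getD j 0 - prev.getD j 0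
        = (pvSpecRow prev (matrix.getD k []) n).getD (j + 1) 0 := by
      rw [pvPartial_getD prev (matrix.getD k []) n j (by omega),
          pvSpecRow_getD prev (matrix.getD k []) n j h0 (by omega),
          pvSpecRow_getD prev (matrix.getD k []) n (j + 1) h0 (by omega), pvRowSum_succ]
      ring
    rw [hval, pvPartial_set prev (matrix.getD k []) n j (by omega)]

lemma aInner (matrix : List (List Int)) (n k : Nat) (pref : List (List Int)) (prev : List Int)
    (h1 : pref.getD k [] = prev) (h2 : pref.getD (k + 1) [] = pvZ n)
    (h0 : prev.getD 0 0 = 0) (hk : k + 1 < pref.length) :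
    ((PySem.List.pyRange 1 ((n : Int) + 1) 1).foldl (fun pref jj =>
        PySem.List.pySetD pref ((k : Int) + 1)
          (PySem.List.pySetD (PySem.List.pyGetD pref ((k : Int) + 1) []) jj
            (PySem.List.pyGetD (PySem.List.pyGetD matrix ((k : Int) + 1 - 1) []) (jj - 1) 0
             + PySem.List.pyGetD (PySem.List.pyGetD pref ((k : Int) + 1 - 1) []) jj 0
             + PySem.List.pyGetD (PySem.List.pyGetD pref ((k : Int) + 1) []) (jj - 1) 0
             - PySem.List.pyGetD (PySem.List.pyGetD pref ((k : Int) + 1 - 1) []) (jj - 1) 0)))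
      pref)
    = pref.set (k + 1) (pvSpecRow prev (matrix.getD k []) n) := by
  rw [aInnerAux matrix n k pref prev h1 h2 h0 hk n (le_refl n), pvPartial_last]

lemma aOuter (matrix : List (List Int)) (n : Nat) (i : Nat) (hi : i ≤ matrix.length) :
    (((PySem.List.pyRange 1 ((matrix.length : Int) + 1) 1).take i).foldl (fun pref (ii : Int) =>
      (PySem.List.pyRange 1 ((n : Int) + 1) 1).foldl (fun pref j =>
        PySem.List.pySetD pref ii
          (PySem.List.pySetD (PySem.List.pyGetD pref ii []) j
            (PySem.List.pyGetD (PySem.List.pyGetD matrix (ii - 1) []) (j - 1) 0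
             + PySem.List.pyGetD (PySem.List.pyGetD pref (ii - 1) []) j 0
             + PySem.List.pyGetD (PySem.List.pyGetD pref ii []) (j - 1) 0
             - PySem.List.pyGetD (PySem.List.pyGetD pref (ii - 1) []) (j - 1) 0)))
        pref)
      (List.replicate (matrix.length + 1) (pvZ n)))
    = (pvZ n :: pvRows (pvZ n) n (matrix.take i)) ++ List.replicate (matrix.length - i) (pvZ n) := by
  induction i with
  | zero => simp [pvRows, List.replicate_succ]
  | succ i ih =>
    have him : i < matrix.length := by omega
    have hlenr : i < (PySem.List.pyRange 1 ((matrix.length : Int) + 1) 1).length := by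
      rw [PySem.List.length_pyRange_one]; omega
    have htake : (PySem.List.pyRange 1 ((matrix.length : Int) + 1) 1).take (i + 1)
        = (PySem.List.pyRange 1 ((matrix.length : Int) + 1) 1).take i
          ++ [(1 : Int) + (i : Int)] := by
      rw [← List.take_concat_get hlenr, List.concat_eq_append]
      congr 2
      rw [PySem.List.getElem_pyRange_one]
    rw [htake, List.foldl_append, ih (by omega)]
    simp only [List.foldl_cons, List.foldl_nil]
    rw [show (1 : Int) + (i : Int) = ((i : Nat) : Int) + 1 from by ring]
    -- lengths of the pieces
    have hfl : (pvZ n :: pvRows (pvZ n) n (matrix.take i)).length = i + 1 := by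
      simp [pvRows_length, List.length_take]; omega
    have h1 : ((pvZ n :: pvRows (pvZ n) n (matrix.take i)) ++ List.replicate (matrix.length - i) (pvZ n)).getD i []
        = (pvZ n :: pvRows (pvZ n) n (matrix.take i)).getD i [] := by
      simp only [List.getD]
      rw [List.getElem?_append_left (by omega)]
    have h2 : ((pvZ n :: pvRows (pvZ n) n (matrix.take i)) ++ List.replicate (matrix.length - i) (pvZ n)).getD (i + 1) []
        = pvZ n := by
      simp only [List.getD]
      rw [List.getElem?_append_right (by omega), hfl]
      simp [him]
    have h0' : ((pvZ n :: pvRows (pvZ n) n (matrix.take i)).getD i []).getD 0 0 = 0 :=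
      pvRows_head_zero (pvZ n) n (matrix.take i) (by simp [pvZ]) i
    have hk : i + 1 < ((pvZ n :: pvRows (pvZ n) n (matrix.take i)) ++ List.replicate (matrix.length - i) (pvZ n)).length := by
      simp only [List.length_append, hfl, List.length_replicate]; omega
    rw [aInner matrix n i _ _ h1 h2 h0' hk]
    -- now push the set through the append
    have hrep : List.replicate (matrix.length - i) (pvZ n)
        = pvZ n :: List.replicate (matrix.length - i - 1) (pvZ n) := by
      rw [← List.replicate_succ]; congr 1; omega
    rw [hrep, List.set_append_right _ _ (by omega), hfl,
        show i + 1 - (i + 1) = 0 from by omega, List.set_cons_zero]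
    have hfront : (pvZ n :: pvRows (pvZ n) n (matrix.take i))
          ++ [pvSpecRow ((pvZ n :: pvRows (pvZ n) n (matrix.take i)).getD i []) (matrix.getD i []) n]
        = pvZ n :: pvRows (pvZ n) n (matrix.take (i + 1)) := by
      rw [← List.take_concat_get him, List.concat_eq_append]
      rw [pvRows_append_one n (matrix.take i) (pvZ n) (matrix[i])]
      have hlen2 : (List.take i matrix).length = i := by rw [List.length_take]; omega
      have hgd : matrix.getD i [] = matrix[i] := by
        simp [List.getD, List.getElem?_eq_getElem him]
      rw [hlen2, hgd]
    rw [← hfront]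
    simp only [List.append_assoc, List.singleton_append]
    rw [show matrix.length - i - 1 = matrix.length - (i + 1) from by omega]

-- ===== VERDICT (by name: the statement is the Claim_ definition above) =====
theorem build_2d_prefix_sum_spec : Claim_equal_build_2d_prefix_sum := by
  intro matrix _ _
  unfold Spec_build_2d_prefix_sum build_2d_prefix_sum build_2d_prefix_sum_alt
  by_cases h : matrix = [] ∨ matrix.headD [] = []
  · rw [if_pos h, if_pos h]
  · simp only [h, if_false]
    have hm : (PySem.List.pyRange 1 ((matrix.length : Int) + 1) 1)
        = (PySem.List.pyRange 1 ((matrix.length : Int) + 1) 1).take matrix.length := by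
      rw [List.take_of_length_le (by rw [PySem.List.length_pyRange_one]; omega)]
    rw [hm]
    rw [show List.replicate (matrix.length + 1) (List.replicate ((matrix.headD []).length + 1) (0:Int))
        = List.replicate (matrix.length + 1) (pvZ (matrix.headD []).length) from rfl]
    rw [aOuter matrix (matrix.headD []).length matrix.length (le_refl _)]
    simp only [List.take_length, Nat.sub_self, List.replicate_zero, List.append_nil]
    simp only [bInner]
    rw [show List.replicate ((matrix.headD []).length + 1) (0:Int) = pvZ (matrix.headD []).length from rfl]
    rw [bFold (matrix.headD []).length matrix [pvZ (matrix.headD []).length] (pvZ (matrix.headD []).length)]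
    rfl
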